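-- pv_equiv track=rewrite | github.com/Donghunn-Lee/CodingTest | 백준/Silver/1181. 단어 정렬/단어 정렬.py | word_sort
-- ===== SOURCE A (Python) =====
-- def word_sort(words):
--     words.sort(key = lambda x : (len(x), x))
--     tmp = set()
--     ans = []
--
--     for i in words:
--         if i not in tmp:
--             tmp.add(i)
--             ans.append(i)
--
--     return "\n".join(ans)
-- ===== SOURCE B (Python) =====
-- # Different algorithm: bucket words by length into sets, then output buckets in
-- # increasing length, each sorted lexicographically (no global (len, word) sort,
-- # no dedup pass over a sorted run).
-- # NOTE: A sorts `words` in place; B does not mutate its argument. The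
-- # equivalence claimed is about the RETURN value only.
-- def word_sort(words):
--     buckets = {}
--     for w in words:
--         buckets.setdefault(len(w), set()).add(w)
--     ans = []
--     for length in sorted(buckets):
--         ans.extend(sorted(buckets[length]))
--     return "\n".join(ans)
-- ===== Notes on version B (the rewrite author's own statement) =====
-- stated objective: alternative
-- what changed: Instead of sorting the whole list by (len, word) and deduplicating the sorted run with a seen-set, B groups the words into a dict mapping length -> set of words, then concatenates the buckets in increasing length with each bucket sorted lexicographically; B does not mutate the argument (A sorts it in place), the return value is identical.
import Mathlib
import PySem

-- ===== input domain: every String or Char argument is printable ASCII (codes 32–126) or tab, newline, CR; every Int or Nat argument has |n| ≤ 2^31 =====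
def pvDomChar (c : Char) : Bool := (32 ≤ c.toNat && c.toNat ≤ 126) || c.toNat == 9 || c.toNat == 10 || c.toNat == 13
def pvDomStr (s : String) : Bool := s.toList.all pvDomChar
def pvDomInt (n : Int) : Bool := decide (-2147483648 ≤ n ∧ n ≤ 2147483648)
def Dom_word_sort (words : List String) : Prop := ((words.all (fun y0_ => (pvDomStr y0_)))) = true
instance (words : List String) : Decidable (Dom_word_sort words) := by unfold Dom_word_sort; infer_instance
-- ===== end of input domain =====

-- B replaces A's global (len, word) sort + seen-set dedup by bucketing: a dict length -> set
-- of words, emitted in increasing length with each bucket sorted lexicographically.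
-- NOTE: the Python A sorts `words` in place and B does not mutate its argument; the
-- equivalence proved here is about the RETURN value only.

-- the Python sort key `(len(x), x)`: Python tuple comparison is lexicographic
def pvKey (x : String) : Int ×ₗ String := toLex (PySem.Str.len x, x)

-- ===== PORT A =====
def word_sort (words : List String) : String :=
  let ws := PySem.List.sorted words pvKey false
  let st := ws.foldl
    (fun (st : PySem.Set String × List String) i =>
      if PySem.Set.contains st.1 i = false then (PySem.Set.add st.1 i, st.2 ++ [i]) else st)
    (PySem.Set.empty, [])
  PySem.Str.join "\n" st.2

-- ===== PORT B =====
def word_sort_alt (words : List String) : String :=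
  let buckets := words.foldl
    (fun (d : PySem.Dict Int (PySem.Set String)) w =>
      d.modify (PySem.Str.len w) PySem.Set.empty (fun s => PySem.Set.add s w))
    PySem.Dict.empty
  let ans := (PySem.List.sorted buckets.keys (fun x => x) false).foldl
    (fun acc length =>
      acc ++ PySem.List.sorted (buckets.getD length PySem.Set.empty) (fun x => x) false)
    []
  PySem.Str.join "\n" ans

-- ===== PRECONDITION & SPEC =====
def Spec_word_sort (words : List String) (out : String) : Prop := out = word_sort_alt words
instance (words : List String) (out : String) : Decidable (Spec_word_sort words out) := by unfold Spec_word_sort; infer_instance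

-- ===== CLAIM (what is proved, stated in full; the proofs are below) =====
def Claim_equal_word_sort : Prop := ∀ (words : List String), Dom_word_sort words → Spec_word_sort words (word_sort words)

-- ===== LEMMAS AND PROOFS =====

lemma pvKey_injective : Function.Injective pvKey := by
  intro a b h
  have := congrArg (fun p => (ofLex p).2) h
  simpa [pvKey] using this

lemma pvKey_lt_of_len_lt {a b : String} (h : PySem.Str.len a < PySem.Str.len b) :
    pvKey a < pvKey b := by
  rw [pvKey, pvKey, Prod.Lex.toLex_lt_toLex]
  exact Or.inl h

lemma pvKey_lt_of_len_eq_of_lt {a b : String} (hl : PySem.Str.len a = PySem.Str.len b)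
    (h : a < b) : pvKey a < pvKey b := by
  rw [pvKey, pvKey, Prod.Lex.toLex_lt_toLex]
  exact Or.inr ⟨hl, h⟩

-- A's dedup loop over the sorted run from state (s, s) is the Set.add fold (tmp and ans coincide)
lemma a_fold_eq : ∀ (ws : List String) (s : PySem.Set String),
    ws.foldl
      (fun (st : PySem.Set String × List String) i =>
        if PySem.Set.contains st.1 i = false then (PySem.Set.add st.1 i, st.2 ++ [i]) else st)
      (s, s)
    = (ws.foldl PySem.Set.add s, ws.foldl PySem.Set.add s) := by
  intro ws
  induction ws with
  | nil => intro s; rfl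
  | cons w rest ih =>
    intro s
    simp only [List.foldl_cons]
    by_cases h : w ∈ s
    · have hc : PySem.Set.contains s w = true := (PySem.Set.contains_iff s w).2 h
      rw [hc, if_neg (by simp), PySem.Set.add_of_mem h]
      exact ih s
    · have hc : PySem.Set.contains s w = false := by
        cases hx : PySem.Set.contains s w
        · rfl
        · exact absurd ((PySem.Set.contains_iff s w).1 hx) h
      rw [hc, if_pos rfl, ← PySem.Set.add_of_not_mem h]
      exact ih (PySem.Set.add s w)

-- set(xs) keeps a subsequence of xs (first occurrences in order)
lemma ofList_sublist {α : Type} [BEq α] [LawfulBEq α] :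
    ∀ (xs : List α), List.Sublist (PySem.Set.ofList xs) xs := by
  intro xs
  induction xs with
  | nil => simp [PySem.Set.ofList]
  | cons x xs ih =>
    rw [PySem.Set.ofList_cons]
    refine List.Sublist.cons₂ x (List.Sublist.trans ?_ ih)
    simp only [PySem.Set.discard]
    exact List.filter_sublist

-- the bucket a grouping fold holds at key L is the Set.add fold of the words of length L
lemma getD_bucket : ∀ (ws : List String) (d : PySem.Dict Int (PySem.Set String)) (L : Int),
    PySem.Dict.getD
      (ws.foldl
        (fun d w => PySem.Dict.modify d (PySem.Str.len w) PySem.Set.empty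
          (fun s => PySem.Set.add s w)) d)
      L PySem.Set.empty
    = (ws.filter (fun w => PySem.Str.len w == L)).foldl PySem.Set.add
        (PySem.Dict.getD d L PySem.Set.empty) := by
  intro ws
  induction ws with
  | nil => intro d L; rfl
  | cons w rest ih =>
    intro d L
    simp only [List.foldl_cons, List.filter_cons]
    rw [ih]
    by_cases h : PySem.Str.len w = L
    · subst h
      rw [PySem.Dict.getD_modify, if_pos rfl, if_pos (by simp), List.foldl_cons]
    · rw [PySem.Dict.getD_modify, if_neg (fun hx => h hx.symm),
        if_neg (by simpa using h)]

-- every word of a lexicographically sorted length-L bucket has length L and comes from words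
lemma mem_blk {words : List String} {L : Int} {x : String}
    (h : x ∈ PySem.List.sorted
      (PySem.Set.ofList (words.filter (fun w => PySem.Str.len w == L))) (fun x => x) false) :
    PySem.Str.len x = L ∧ x ∈ words := by
  rw [PySem.List.mem_sorted, PySem.Set.mem_ofList, List.mem_filter] at h
  exact ⟨by simpa using h.2, h.1⟩

-- B's concatenation of buckets is strictly increasing under the (len, word) key
lemma b_pairwise (words : List String) :
    List.Pairwise (fun a b => pvKey a < pvKey b)
      (List.flatMap
        (fun L => PySem.List.sorted
          (PySem.Set.ofList (words.filter (fun w => PySem.Str.len w == L))) (fun x => x) false)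
        (PySem.List.sorted (PySem.Set.ofList (words.map PySem.Str.len)) (fun x => x) false)) := by
  rw [List.pairwise_flatMap]
  constructor
  · intro L _
    have hlt := PySem.List.sorted_ofList_pairwise_lt
      (xs := words.filter (fun w => PySem.Str.len w == L))
    exact hlt.imp_of_mem (fun {a b} ha hb hab =>
      pvKey_lt_of_len_eq_of_lt ((mem_blk ha).1.trans (mem_blk hb).1.symm) hab)
  · have hks := PySem.List.sorted_ofList_pairwise_lt (xs := words.map PySem.Str.len)
    exact hks.imp (fun {L1 L2} h12 x hx y hy =>
      pvKey_lt_of_len_lt (by rw [(mem_blk hx).1, (mem_blk hy).1]; exact h12))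

-- ===== VERDICT (by name: the statement is the Claim_ definition above) =====
theorem word_sort_spec : Claim_equal_word_sort := by
  intro words _
  unfold Spec_word_sort
  -- name A's output list
  have hA : word_sort words
      = PySem.Str.join "\n" (PySem.Set.ofList (PySem.List.sorted words pvKey false)) := by
    show PySem.Str.join "\n"
      ((PySem.List.sorted words pvKey false).foldl
        (fun (st : PySem.Set String × List String) i =>
          if PySem.Set.contains st.1 i = false then (PySem.Set.add st.1 i, st.2 ++ [i]) else st)
        (([] : PySem.Set String), ([] : List String))).2 = _
    rw [a_fold_eq, PySem.Set.ofList_eq_foldl]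
  -- name B's output list
  have hB : word_sort_alt words
      = PySem.Str.join "\n"
          (List.flatMap
            (fun L => PySem.List.sorted
              (PySem.Set.ofList (words.filter (fun w => PySem.Str.len w == L)))
              (fun x => x) false)
            (PySem.List.sorted (PySem.Set.ofList (words.map PySem.Str.len)) (fun x => x) false)) := by
    simp only [word_sort_alt]
    rw [PySem.List.foldl_append_eq_flatMap, List.nil_append]
    have hkeys : (words.foldl
        (fun (d : PySem.Dict Int (PySem.Set String)) w =>
          d.modify (PySem.Str.len w) PySem.Set.empty (fun s => PySem.Set.add s w))
        PySem.Dict.empty).keys = PySem.Set.ofList (words.map PySem.Str.len) := by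
      rw [PySem.Dict.keys_foldl_modify_key words PySem.Str.len PySem.Set.empty
        (fun _ w => fun s => PySem.Set.add s w) PySem.Dict.empty]
      exact PySem.Set.update_nil_left _
    rw [hkeys]
    refine congrArg (PySem.Str.join "\n") (congrFun (congrArg List.flatMap ?_) _)
    funext L
    rw [getD_bucket, PySem.Dict.getD_empty,
      show (PySem.Set.empty : PySem.Set String) = [] from rfl, ← PySem.Set.ofList_eq_foldl]
  rw [hA, hB]
  congr 1
  -- the two lists: same distinct elements, both nondecreasing under the injective key
  set LA := PySem.Set.ofList (PySem.List.sorted words pvKey false) with hLA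
  set LB := List.flatMap
    (fun L => PySem.List.sorted
      (PySem.Set.ofList (words.filter (fun w => PySem.Str.len w == L))) (fun x => x) false)
    (PySem.List.sorted (PySem.Set.ofList (words.map PySem.Str.len)) (fun x => x) false) with hLB
  have hpb := b_pairwise words
  rw [← hLB] at hpb
  have hNA : LA.Nodup := PySem.Set.nodup_ofList _
  have hNB : LB.Nodup := hpb.imp (fun {a b} h => by
    intro he; exact absurd (he ▸ h) (lt_irrefl _))
  have hmemA : ∀ x, x ∈ LA ↔ x ∈ words := by
    intro x
    rw [hLA, PySem.Set.mem_ofList, PySem.List.mem_sorted]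
  have hmemB : ∀ x, x ∈ LB ↔ x ∈ words := by
    intro x
    rw [hLB, List.mem_flatMap]
    constructor
    · rintro ⟨L, _, hx⟩; exact (mem_blk hx).2
    · intro hx
      refine ⟨PySem.Str.len x, ?_, ?_⟩
      · rw [PySem.List.mem_sorted, PySem.Set.mem_ofList]
        exact List.mem_map_of_mem hx
      · rw [PySem.List.mem_sorted, PySem.Set.mem_ofList, List.mem_filter]
        exact ⟨hx, by simp⟩
  have hperm : LA.Perm LB :=
    (List.perm_ext_iff_of_nodup hNA hNB).2 (fun a => (hmemA a).trans (hmemB a).symm)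
  exact PySem.List.eq_of_perm_of_pairwise_le_of_injective pvKey pvKey_injective hperm
    ((PySem.List.sorted_pairwise words pvKey).sublist (ofList_sublist _))
    (hpb.imp (fun {a b} h => le_of_lt h))
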